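-- pv_equiv track=rewrite | github.com/jamesderlin/edit-filenames | edit-move.py | sanitized_path
-- ===== SOURCE A (Python) =====
-- def sanitized_path(s):
--     """
--     Returns a sanitized version of the specified file path.
--
--     Carriage return and linefeed characters will be replaced with a single
--     space, and all other control characters will be removed.
--     """
--     def replacement_char(c):
--         if c in "\r\n":
--             return " "
--         elif ord(c) < ord(" "):
--             # Remove control characters.
--             return ""
--         else:
--             return c
--
--     return "".join((replacement_char(c) for c in s))
-- ===== SOURCE B (Python) =====
-- # Staged rewrite: first normalize CR/LF to spaces with global string replacement,
-- # then drop remaining control characters with a single threshold filter.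
-- def sanitized_path(s):
--     """
--     Returns a sanitized version of the specified file path.
--
--     Carriage return and linefeed characters will be replaced with a single
--     space, and all other control characters will be removed.
--     """
--     spaced = s.replace("\r", " ").replace("\n", " ")
--     return "".join(c for c in spaced if c >= " ")
-- ===== Notes on version B (the rewrite author's own statement) =====
-- stated objective: faster
-- what changed: Replaces A's single per-character branching function (membership test + ord threshold inside a generator) with two staged passes: global str.replace substitutions normalizing CR/LF to spaces, then one threshold filter dropping the remaining control characters.
import Mathlib
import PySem

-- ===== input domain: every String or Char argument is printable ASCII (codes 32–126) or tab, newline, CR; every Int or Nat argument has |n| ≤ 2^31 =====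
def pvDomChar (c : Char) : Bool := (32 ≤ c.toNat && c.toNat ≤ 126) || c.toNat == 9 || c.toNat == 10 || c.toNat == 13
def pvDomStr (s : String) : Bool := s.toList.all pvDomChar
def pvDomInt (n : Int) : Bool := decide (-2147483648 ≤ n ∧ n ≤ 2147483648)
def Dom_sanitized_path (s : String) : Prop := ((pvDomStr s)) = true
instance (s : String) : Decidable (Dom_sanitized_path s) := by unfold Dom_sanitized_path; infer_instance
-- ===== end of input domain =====

-- B replaces A's single per-character branching pass with two staged passes:
-- global str.replace substitutions normalizing CR/LF to spaces, then one
-- threshold filter dropping the remaining control characters.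

-- ===== PORT A =====
def replacement_char (c : Char) : String :=
  if c ∈ ['\r', '\n'] then " "
  else if c.toNat < ' '.toNat then ""
  else String.ofList [c]

def sanitized_path (s : String) : String :=
  String.ofList (s.toList.flatMap (fun c => (replacement_char c).toList))

-- ===== PORT B =====
def sanitized_path_alt (s : String) : String :=
  let spaced := PySem.Str.replace (PySem.Str.replace s "\r" " ") "\n" " "
  String.ofList (spaced.toList.filter (fun c => ' ' ≤ c))

-- ===== PRECONDITION & SPEC =====
def Spec_sanitized_path (s : String) (out : String) : Prop := out = sanitized_path_alt s
instance (s : String) (out : String) : Decidable (Spec_sanitized_path s out) := by unfold Spec_sanitized_path; infer_instance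

-- ===== CLAIM =====
def Claim_equal_sanitized_path : Prop := ∀ (s : String), Dom_sanitized_path s → Spec_sanitized_path s (sanitized_path s)

-- ===== LEMMAS AND PROOFS =====

-- single-character replace is a pointwise map
theorem replace_go_single (a b : Char) :
    ∀ (fuel : Nat) (l acc : List Char), l.length ≤ fuel →
      PySem.Chars.replace.go [a] [b] fuel l acc
        = acc.reverse ++ l.map (fun c => if c = a then b else c) := by
  intro fuel
  induction fuel with
  | zero =>
    intro l acc h
    have : l = [] := List.length_eq_zero_iff.mp (Nat.le_zero.mp h)
    subst this
    simp [PySem.Chars.replace.go]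
  | succ n ih =>
    intro l acc h
    cases l with
    | nil => simp [PySem.Chars.replace.go]
    | cons c t =>
      simp only [PySem.Chars.replace.go]
      by_cases hc : c = a
      · subst hc
        have hp : [c].isPrefixOf (c :: t) = true := by simp [List.isPrefixOf]
        simp only [hp, if_true, List.length_cons] at *
        simp only [List.length_nil, List.drop_succ_cons, List.drop_zero, List.reverse_cons,
          List.reverse_nil, List.nil_append]
        rw [ih t ([b] ++ acc) (by omega)]
        simp
      · have hp : [a].isPrefixOf (c :: t) = false := by
          simp [List.isPrefixOf]; exact fun h' => absurd h'.symm hc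
        simp only [hp, Bool.false_eq_true, if_false]
        rw [ih t (c :: acc) (by simpa using Nat.lt_succ_iff.mp (by simpa using h))]
        simp [hc]

theorem replace_single (a b : Char) (l : List Char) :
    PySem.Chars.replace l [a] [b] = l.map (fun c => if c = a then b else c) := by
  unfold PySem.Chars.replace
  simpa using replace_go_single a b l.length l [] le_rfl

-- per-list agreement on domain characters
theorem list_eq (l : List Char) (h : l.all pvDomChar = true) :
    l.flatMap (fun c => (replacement_char c).toList)
      = ((l.map (fun c => if c = '\r' then ' ' else c)).map
          (fun c => if c = '\n' then ' ' else c)).filter (fun c => ' ' ≤ c) := by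
  induction l with
  | nil => rfl
  | cons c t ih =>
    simp only [List.all_cons, Bool.and_eq_true] at h
    have hd := h.1
    simp only [pvDomChar, Bool.or_eq_true, Bool.and_eq_true, decide_eq_true_eq,
      beq_iff_eq] at hd
    simp only [List.flatMap_cons, List.map_cons, List.filter_cons, ih h.2]
    rcases hd with (((⟨h32, _⟩ | h9) | h10) | h13)
    · have hr : c ≠ '\r' := fun hc => by subst hc; exact absurd h32 (by decide)
      have hn : c ≠ '\n' := fun hc => by subst hc; exact absurd h32 (by decide)
      have hge : ' ' ≤ c := by
        rw [Char.le_def, UInt32.le_iff_toNat_le]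
        simpa using h32
      simp [replacement_char, hr, hn, hge, show ¬ c.toNat < 32 by omega]
    · have : c = '\t' := Char.ext (UInt32.toNat_inj.mp (h9.trans rfl))
      subst this; simp [replacement_char]
    · have : c = '\n' := Char.ext (UInt32.toNat_inj.mp (h10.trans rfl))
      subst this; simp [replacement_char]
    · have : c = '\r' := Char.ext (UInt32.toNat_inj.mp (h13.trans rfl))
      subst this; simp [replacement_char]

-- ===== VERDICT =====
theorem sanitized_path_spec : Claim_equal_sanitized_path := by
  intro s hd
  unfold Spec_sanitized_path sanitized_path sanitized_path_alt
  apply congrArg String.ofList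
  simp only [PySem.Str.replace, String.toList_ofList]
  have hr : ("\r" : String).toList = ['\r'] := rfl
  have hn : ("\n" : String).toList = ['\n'] := rfl
  have hs : (" " : String).toList = [' '] := rfl
  rw [hr, hn, hs, replace_single, replace_single]
  exact list_eq s.toList hd
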